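-- pv_equiv track=rewrite | github.com/LPMP/BDD | src/specialized_solvers/solve_easy_variables.py | compute_mm_type
-- ===== SOURCE A (Python) =====
-- def compute_mm_type(var_names, mm_diff, threshold):
--     mm_type = {}
--     for i in range(len(var_names)):
--         var_name = var_names[i]
--         cur_mm_diff = mm_diff[i]
--         if cur_mm_diff >= threshold:
--             direction = 'zero'
--         elif cur_mm_diff >= threshold:
--             direction = 'one'
--         else:
--             direction = 'undecided'
--         existing_direction = mm_type.get(var_name, None)
--         if existing_direction is None:
--             mm_type[var_name] = direction
--         elif existing_direction != direction:
--             mm_type[var_name] = 'undecided'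
--     return mm_type
-- ===== SOURCE B (Python) =====
-- def compute_mm_type(var_names, mm_diff, threshold):
--     # Group-by pass: collect every occurrence's mm_diff value per variable
--     # (first-occurrence key order), then a reduction pass renders each group.
--     groups = {}
--     for i in range(len(var_names)):
--         groups.setdefault(var_names[i], []).append(mm_diff[i])
--     return {name: ('zero' if all(v >= threshold for v in vals) else 'undecided')
--             for name, vals in groups.items()}
-- ===== Notes on version B (the rewrite author's own statement) =====
-- stated objective: alternative
-- what changed: Replaces A's online string-merge pass (compare stored direction, demote on mismatch, with a dead 'one' branch) by a group-by pass that collects each variable's mm_diff values into per-key lists, followed by a separate reduction pass rendering each group with all(v >= threshold).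
import Mathlib
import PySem

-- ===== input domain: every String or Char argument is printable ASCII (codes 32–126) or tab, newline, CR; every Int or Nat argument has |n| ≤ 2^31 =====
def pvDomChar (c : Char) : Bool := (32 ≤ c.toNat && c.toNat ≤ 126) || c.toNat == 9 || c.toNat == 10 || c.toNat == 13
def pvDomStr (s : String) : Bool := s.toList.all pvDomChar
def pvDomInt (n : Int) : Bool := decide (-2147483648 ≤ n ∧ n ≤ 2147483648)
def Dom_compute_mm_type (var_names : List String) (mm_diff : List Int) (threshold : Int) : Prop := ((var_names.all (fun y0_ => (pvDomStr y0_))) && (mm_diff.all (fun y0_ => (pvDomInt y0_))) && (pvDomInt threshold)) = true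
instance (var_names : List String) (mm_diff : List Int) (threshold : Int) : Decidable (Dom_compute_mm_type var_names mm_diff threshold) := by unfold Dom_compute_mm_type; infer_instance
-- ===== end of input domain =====

-- B replaces A's online string-merge by a group-by pass (per-variable value lists) plus a reduction pass rendering each group; alternative decomposition, same cost.


-- ===== PORT A =====
-- one loop step of A: look up mm_diff[i], choose the direction string, merge into the dict
def mmStepA (mm_diff : List Int) (threshold : Int) (d : PySem.Dict String String) (p : Int × String) : PySem.Dict String String :=
  match PySem.List.pyGet? mm_diff p.1 with
  | none => d  -- IndexError in Python; excluded by Pre_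
  | some cur =>
    let direction : String :=
      if cur ≥ threshold then "zero"
      else if cur ≥ threshold then "one"
      else "undecided"
    match d.get? p.2 with
    | none => d.insert p.2 direction
    | some existing => if existing ≠ direction then d.insert p.2 "undecided" else d

def compute_mm_type (var_names : List String) (mm_diff : List Int) (threshold : Int) : List (String × String) :=
  ((PySem.List.enumerate var_names 0).foldl (mmStepA mm_diff threshold) PySem.Dict.empty).items

-- ===== PORT B =====
-- grouping step of B: append mm_diff[i] to the list stored under var_names[i] (setdefault + append)
def mmGroup (mm_diff : List Int) (d : PySem.Dict String (List Int)) (p : Int × String) : PySem.Dict String (List Int) :=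
  match PySem.List.pyGet? mm_diff p.1 with
  | none => d  -- IndexError in Python; excluded by Pre_
  | some v =>
    match d.get? p.2 with
    | none => d.insert p.2 [v]
    | some l => d.insert p.2 (l ++ [v])

-- reduction of one group: 'zero' iff all collected values pass the threshold
def mmAgg (threshold : Int) (vals : List Int) : String :=
  if vals.all (fun v => decide (v ≥ threshold)) then "zero" else "undecided"

def mmRender (threshold : Int) (q : String × List Int) : String × String := (q.1, mmAgg threshold q.2)

def compute_mm_type_alt (var_names : List String) (mm_diff : List Int) (threshold : Int) : List (String × String) :=
  (((PySem.List.enumerate var_names 0).foldl (mmGroup mm_diff) PySem.Dict.empty).items).map (mmRender threshold)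

-- ===== PRECONDITION & SPEC =====
-- A (and B) raise IndexError on mm_diff[i] when mm_diff is shorter than var_names; exactly those inputs are excluded.
def Pre_compute_mm_type (var_names : List String) (mm_diff : List Int) (threshold : Int) : Prop :=
  var_names.length ≤ mm_diff.length
instance (var_names : List String) (mm_diff : List Int) (threshold : Int) : Decidable (Pre_compute_mm_type var_names mm_diff threshold) := by unfold Pre_compute_mm_type; infer_instance

def pvWitness_compute_mm_type : List String × List Int × Int := (["x", "y", "x"], [1, 0, -1], 1)

def Spec_compute_mm_type (var_names : List String) (mm_diff : List Int) (threshold : Int) (out : List (String × String)) : Prop := out = compute_mm_type_alt var_names mm_diff threshold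
instance (var_names : List String) (mm_diff : List Int) (threshold : Int) (out : List (String × String)) : Decidable (Spec_compute_mm_type var_names mm_diff threshold out) := by unfold Spec_compute_mm_type; infer_instance

-- ===== CLAIM (what is proved, stated in full; the proofs are below) =====
def Claim_equal_compute_mm_type : Prop := ∀ (var_names : List String) (mm_diff : List Int) (threshold : Int), Dom_compute_mm_type var_names mm_diff threshold → Pre_compute_mm_type var_names mm_diff threshold → Spec_compute_mm_type var_names mm_diff threshold (compute_mm_type var_names mm_diff threshold)

-- ===== LEMMAS AND PROOFS =====

theorem get?_mk_map_mmRender (t : Int) (l : List (String × List Int)) (k : String) :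
    (PySem.Dict.mk (l.map (mmRender t))).get? k
      = ((PySem.Dict.mk l).get? k).map (mmAgg t) := by
  induction l with
  | nil => rfl
  | cons x xs ih =>
    obtain ⟨a, b⟩ := x
    simp only [List.map_cons, mmRender, PySem.Dict.get?_mk_cons]
    cases h : (a == k) with
    | true => simp
    | false => simp only [Bool.false_eq_true, if_false]; exact ih

theorem contains_mk_map_mmRender (t : Int) (l : List (String × List Int)) (k : String) :
    (PySem.Dict.mk (l.map (mmRender t))).contains k = (PySem.Dict.mk l).contains k := by
  rw [PySem.Dict.contains_eq_isSome_get?, PySem.Dict.contains_eq_isSome_get?,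
    get?_mk_map_mmRender]
  cases (PySem.Dict.mk l).get? k <;> rfl

-- replacing the k-entry's group by one with the same rendering leaves the rendered items unchanged
theorem map_replace_render (t : Int) (l : List (String × List Int)) (k : String)
    (w vold : List Int) (h : (PySem.Dict.mk l).get? k = some vold)
    (hf : mmAgg t w = mmAgg t vold) (hnd : (l.map Prod.fst).Nodup) :
    (l.map (fun p => if (p.1 == k) = true then (k, w) else p)).map (mmRender t)
      = l.map (mmRender t) := by
  induction l with
  | nil =>
    exact absurd h (by
      rw [show (PySem.Dict.mk ([] : List (String × List Int))) = PySem.Dict.empty from rfl,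
        PySem.Dict.get?_empty]; simp)
  | cons x xs ih =>
    rw [PySem.Dict.get?_mk_cons] at h
    simp only [List.map_cons, List.nodup_cons] at hnd
    by_cases hx : (x.1 == k) = true
    · rw [if_pos hx] at h
      have hk : x.1 = k := eq_of_beq hx
      have hv : x.2 = vold := Option.some.inj h
      simp only [List.map_cons]
      congr 1
      · simp [hx, mmRender, hf, ← hk, hv]
      · congr 1
        conv_rhs => rw [← List.map_id xs]
        apply List.map_congr_left
        intro p hp
        have hpne : (p.1 == k) ≠ true := by
          intro he
          have hpk : p.1 = k := eq_of_beq he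
          exact hnd.1 (by rw [hk, ← hpk]; exact List.mem_map_of_mem hp)
        simp [hpne]
    · rw [if_neg hx] at h
      simp only [List.map_cons, hx, Bool.false_eq_true, if_false]
      rw [ih h hnd.2]

-- overwriting the rendered entry with s commutes with rendering an overwrite by w, when w renders to s
theorem replace_render_comm (t : Int) (l : List (String × List Int)) (k : String)
    (w : List Int) (s : String) (hf : mmAgg t w = s) :
    (l.map (mmRender t)).map (fun p => if (p.1 == k) = true then (k, s) else p)
      = (l.map (fun p => if (p.1 == k) = true then (k, w) else p)).map (mmRender t) := by
  simp only [List.map_map]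
  apply List.map_congr_left
  intro p _
  by_cases hp : (p.1 == k) = true <;>
    simp [Function.comp, mmRender, hp, hf, eq_of_beq, *]

-- the A-step acts on the rendered dict exactly as the B grouping step followed by rendering
theorem step_render (mm_diff : List Int) (t : Int)
    (dB : PySem.Dict String (List Int)) (p : Int × String) (hnd : dB.keys.Nodup) :
    mmStepA mm_diff t (PySem.Dict.mk (dB.items.map (mmRender t))) p
      = PySem.Dict.mk ((mmGroup mm_diff dB p).items.map (mmRender t)) := by
  unfold mmStepA mmGroup
  cases hg : PySem.List.pyGet? mm_diff p.1 with
  | none => rfl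
  | some v =>
    simp only []
    have hget := get?_mk_map_mmRender t dB.items p.2
    have hdB : PySem.Dict.mk dB.items = dB := rfl
    rw [hdB] at hget
    have hnd' : (dB.items.map Prod.fst).Nodup := by simpa [PySem.Dict.keys] using hnd
    cases hx : dB.get? p.2 with
    | none =>
      rw [hget, hx]
      simp only [Option.map_none]
      apply PySem.Dict.ext
      rw [PySem.Dict.items_insert_of_not_contains _ _
          (by rw [contains_mk_map_mmRender, hdB, PySem.Dict.contains_eq_isSome_get?, hx]; rfl),
        PySem.Dict.items_insert_of_not_contains dB _
          (by rw [PySem.Dict.contains_eq_isSome_get?, hx]; rfl)]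
      simp only [List.map_append, List.map_cons, List.map_nil, mmRender]
      by_cases hc : v ≥ t <;> simp [mmAgg, hc]
    | some l =>
      rw [hget, hx]
      simp only [Option.map_some]
      have hc' : dB.contains p.2 = true := by
        rw [PySem.Dict.contains_eq_isSome_get?, hx]; rfl
      by_cases hl : l.all (fun v => decide (v ≥ t)) = true <;> by_cases hc : v ≥ t
      · -- all pass, new passes: A unchanged, B appends with same rendering
        have hd : ((if (v ≥ t : Prop) then "zero" else if v ≥ t then "one" else "undecided") : String) = "zero" := by simp [hc]
        rw [hd]
        rw [show mmAgg t l = "zero" from by simp [mmAgg, hl]]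
        rw [if_neg (by simp)]
        apply PySem.Dict.ext
        rw [PySem.Dict.items_insert_of_contains dB _ hc']
        rw [map_replace_render t dB.items p.2 (l ++ [v]) l (by rw [hdB]; exact hx)
          (by simp [mmAgg, List.all_append, hl, hc]) hnd']
      · -- all pass, new fails: A demotes to "undecided", B appends (renders "undecided")
        have hd : ((if (v ≥ t : Prop) then "zero" else if v ≥ t then "one" else "undecided") : String) = "undecided" := by simp [hc]
        rw [hd]
        rw [show mmAgg t l = "zero" from by simp [mmAgg, hl]]
        rw [if_pos (by simp)]
        apply PySem.Dict.ext
        rw [PySem.Dict.items_insert_of_contains _ _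
            (by rw [contains_mk_map_mmRender, hdB, hc']),
          PySem.Dict.items_insert_of_contains dB _ hc']
        exact replace_render_comm t dB.items p.2 (l ++ [v]) "undecided"
          (by simp [mmAgg, List.all_append, hc])
      · -- some failed, new passes: A demotes to "undecided", B appends (renders "undecided")
        have hd : ((if (v ≥ t : Prop) then "zero" else if v ≥ t then "one" else "undecided") : String) = "zero" := by simp [hc]
        rw [hd]
        rw [show mmAgg t l = "undecided" from by simp [mmAgg, hl]]
        rw [if_pos (by simp)]
        apply PySem.Dict.ext
        rw [PySem.Dict.items_insert_of_contains _ _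
            (by rw [contains_mk_map_mmRender, hdB, hc']),
          PySem.Dict.items_insert_of_contains dB _ hc']
        exact replace_render_comm t dB.items p.2 (l ++ [v]) "undecided"
          (by simp [mmAgg, List.all_append, hl])
      · -- some failed, new fails: A unchanged, B appends with same rendering
        have hd : ((if (v ≥ t : Prop) then "zero" else if v ≥ t then "one" else "undecided") : String) = "undecided" := by simp [hc]
        rw [hd]
        rw [show mmAgg t l = "undecided" from by simp [mmAgg, hl]]
        rw [if_neg (by simp)]
        apply PySem.Dict.ext
        rw [PySem.Dict.items_insert_of_contains dB _ hc']
        rw [map_replace_render t dB.items p.2 (l ++ [v]) l (by rw [hdB]; exact hx)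
          (by simp [mmAgg, List.all_append, hl]) hnd']

theorem group_nodup (mm_diff : List Int)
    (dB : PySem.Dict String (List Int)) (p : Int × String) (hnd : dB.keys.Nodup) :
    (mmGroup mm_diff dB p).keys.Nodup := by
  unfold mmGroup
  cases PySem.List.pyGet? mm_diff p.1 with
  | none => exact hnd
  | some v =>
    simp only []
    cases dB.get? p.2 <;> simp only [] <;> exact PySem.Dict.nodup_keys_insert _ _ _ hnd

theorem fold_render (mm_diff : List Int) (t : Int) :
    ∀ (l : List (Int × String)) (dB : PySem.Dict String (List Int)), dB.keys.Nodup →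
    l.foldl (mmStepA mm_diff t) (PySem.Dict.mk (dB.items.map (mmRender t)))
      = PySem.Dict.mk ((l.foldl (mmGroup mm_diff) dB).items.map (mmRender t)) := by
  intro l
  induction l with
  | nil => intro dB _; rfl
  | cons p ps ih =>
    intro dB hnd
    simp only [List.foldl_cons]
    rw [step_render mm_diff t dB p hnd]
    exact ih _ (group_nodup mm_diff dB p hnd)

-- ===== VERDICT (by name: the statement is the Claim_ definition above) =====
theorem compute_mm_type_spec : Claim_equal_compute_mm_type := by
  intro var_names mm_diff threshold _ _
  unfold Spec_compute_mm_type compute_mm_type compute_mm_type_alt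
  have hmain := fold_render mm_diff threshold (PySem.List.enumerate var_names 0) PySem.Dict.empty
    (by simp)
  have he : (PySem.Dict.empty : PySem.Dict String String)
      = PySem.Dict.mk (((PySem.Dict.empty : PySem.Dict String (List Int))).items.map (mmRender threshold)) := rfl
  rw [he, hmain]
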